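-- pv_equiv track=rewrite | github.com/jalom-fgulem/PEG | app/services/ingresos_service.py | _base_record
-- ===== SOURCE A (Python) =====
-- def _base_record(company_code: str, fecha: str, tipo: str) -> list:
--     """Devuelve array mutable de 254 espacios con campos comunes ya rellenos."""
--     arr = [" "] * 254
--     arr[0] = "4"
--     for i, c in enumerate(str(company_code or "")[:5]):
--         arr[1 + i] = c
--     for i, c in enumerate(str(fecha or "")[:8]):
--         arr[6 + i] = c
--     arr[14] = tipo
--     arr[252] = "E"
--     arr[253] = "N"
--     return arr
-- ===== SOURCE B (Python) =====
-- def _base_record(company_code: str, fecha: str, tipo: str) -> list: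
--     """Tabulate the record: compute each of the 254 cells as a pure function of its index."""
--     cc = str(company_code or "")[:5]
--     fe = str(fecha or "")[:8]
--
--     def cell(i):
--         if i == 0:
--             return "4"
--         if 1 <= i <= 5 and i - 1 < len(cc):
--             return cc[i - 1]
--         if 6 <= i <= 13 and i - 6 < len(fe):
--             return fe[i - 6]
--         if i == 14:
--             return tipo
--         if i == 252:
--             return "E"
--         if i == 253:
--             return "N"
--         return " "
--
--     return [cell(i) for i in range(254)]
-- ===== Notes on version B (the rewrite author's own statement) =====
-- stated objective: alternative
-- what changed: B tabulates the record: each of the 254 cells is computed as a pure function of its index (one comprehension over range(254)), instead of A's allocate-a-space-buffer-then-mutate-slots-with-two-enumerate-loops approach.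
import Mathlib
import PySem

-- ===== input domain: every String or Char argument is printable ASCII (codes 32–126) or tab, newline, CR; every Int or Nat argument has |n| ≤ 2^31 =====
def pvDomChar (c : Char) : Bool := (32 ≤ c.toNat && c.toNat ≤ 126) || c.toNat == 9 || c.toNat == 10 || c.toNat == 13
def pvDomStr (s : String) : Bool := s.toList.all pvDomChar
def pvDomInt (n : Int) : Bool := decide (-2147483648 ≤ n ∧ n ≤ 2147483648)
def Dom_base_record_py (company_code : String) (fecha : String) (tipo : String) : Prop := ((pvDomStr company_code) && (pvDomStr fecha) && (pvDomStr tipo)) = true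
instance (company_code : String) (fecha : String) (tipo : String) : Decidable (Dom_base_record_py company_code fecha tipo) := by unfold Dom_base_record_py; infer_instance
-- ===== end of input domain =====

-- B tabulates the record cell-by-cell as a pure function of the index (pull-based) instead of
-- mutating a pre-filled buffer with loops (push-based): an alternative decomposition, same cost.


-- ===== PORT A =====
-- the for-loops 'for i, c in enumerate(...): arr[off+i] = c' become this structural recursion over
-- the characters with the running index; list assignment arr[i] = v is List.set (indices here are
-- always in range in A, so .set is exact)
def pvWriteSeq : List String → Nat → List Char → List String
  | arr, _, [] => arr
  | arr, i, ch :: rest => pvWriteSeq (arr.set i ch.toString) (i + 1) rest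

def base_record_py (company_code : String) (fecha : String) (tipo : String) : List String :=
  let arr := List.replicate 254 " "
  let arr := arr.set 0 "4"
  -- str(company_code or "") : company_code if non-empty else ""; slice [:5] = take 5 (exact for nonneg bound)
  let arr := pvWriteSeq arr 1 ((if company_code = "" then "" else company_code).toList.take 5)
  let arr := pvWriteSeq arr 6 ((if fecha = "" then "" else fecha).toList.take 8)
  let arr := arr.set 14 tipo
  let arr := arr.set 252 "E"
  arr.set 253 "N"

-- ===== PORT B =====
-- B's cell(i): the chain of ifs, step for step; cc[i-1]/fe[i-6] are guarded in range, so getD is exact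
def pvCell (cc fe : List Char) (tipo : String) (i : Nat) : String :=
  if i = 0 then "4"
  else if 1 ≤ i ∧ i ≤ 5 ∧ i - 1 < cc.length then (cc.getD (i - 1) ' ').toString
  else if 6 ≤ i ∧ i ≤ 13 ∧ i - 6 < fe.length then (fe.getD (i - 6) ' ').toString
  else if i = 14 then tipo
  else if i = 252 then "E"
  else if i = 253 then "N"
  else " "

def base_record_py_alt (company_code : String) (fecha : String) (tipo : String) : List String :=
  let cc := (if company_code = "" then "" else company_code).toList.take 5
  let fe := (if fecha = "" then "" else fecha).toList.take 8
  (List.range 254).map (pvCell cc fe tipo)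

-- ===== PRECONDITION & SPEC =====
def Spec_base_record_py (company_code : String) (fecha : String) (tipo : String) (out : List String) : Prop := out = base_record_py_alt company_code fecha tipo
instance (company_code : String) (fecha : String) (tipo : String) (out : List String) : Decidable (Spec_base_record_py company_code fecha tipo out) := by unfold Spec_base_record_py; infer_instance

-- ===== CLAIM (what is proved, stated in full; the proofs are below) =====
def Claim_equal_base_record_py : Prop := ∀ (company_code : String) (fecha : String) (tipo : String), Dom_base_record_py company_code fecha tipo → Spec_base_record_py company_code fecha tipo (base_record_py company_code fecha tipo)

-- ===== LEMMAS AND PROOFS =====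

-- the common canonical form both programs are reduced to
def pvCanon (cc fe : List Char) (t : String) : List String :=
  ["4"] ++ (cc.map (fun c => c.toString) ++ (List.replicate (5 - cc.length) " "
    ++ (fe.map (fun c => c.toString) ++ (List.replicate (8 - fe.length) " "
    ++ (t :: (List.replicate 237 " " ++ ["E", "N"]))))))

-- setting the element just past a prefix replaces the head of the tail
theorem pv_set_at_len (pre : List String) (x : String) (rest : List String) (a : String)
    (i : Nat) (hi : i = pre.length) :
    (pre ++ (x :: rest)).set i a = pre ++ (a :: rest) := by
  subst hi
  induction pre with
  | nil => simp
  | cons h tl ih => simp [ih]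

-- writing a character sequence at consecutive indices into a run of spaces after a prefix
theorem pv_writeSeq_eq (cs : List Char) (pre suf : List String) (m : Nat) (i : Nat)
    (hi : i = pre.length) (h : cs.length ≤ m) :
    pvWriteSeq (pre ++ (List.replicate m " " ++ suf)) i cs
      = pre ++ (cs.map (fun c => c.toString) ++ (List.replicate (m - cs.length) " " ++ suf)) := by
  induction cs generalizing pre m i with
  | nil => simp [pvWriteSeq]
  | cons ch rest ih =>
    cases m with
    | zero => simp at h
    | succ m' =>
      rw [List.replicate_succ, List.cons_append]
      rw [pvWriteSeq, pv_set_at_len pre " " _ _ i hi]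
      have h' : rest.length ≤ m' := by simpa using h
      have := ih (pre ++ [ch.toString]) m' (i + 1) (by simp [hi]) h'
      simpa [List.append_assoc] using this

-- A reduces to the canonical segment form
set_option maxRecDepth 8000 in
theorem pv_A_canon (c f t : String) :
    base_record_py c f t
      = pvCanon ((if c = "" then "" else c).toList.take 5)
                ((if f = "" then "" else f).toList.take 8) t := by
  simp only [base_record_py, pvCanon]
  set cc := (if c = "" then "" else c).toList.take 5 with hcc
  set ff := (if f = "" then "" else f).toList.take 8 with hff
  have hc5 : cc.length ≤ 5 := by rw [hcc]; exact List.length_take_le 5 _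
  have hf8 : ff.length ≤ 8 := by rw [hff]; exact List.length_take_le 8 _
  have e1 : (List.replicate 254 " ").set 0 "4"
      = ["4"] ++ (List.replicate 5 " " ++ (List.replicate 8 " " ++ List.replicate 240 " ")) := by
    rw [show (254 : Nat) = 1 + (5 + (8 + 240)) from rfl, List.replicate_add,
        List.replicate_add, List.replicate_add]
    rfl
  rw [e1]
  rw [pv_writeSeq_eq cc ["4"] (List.replicate 8 " " ++ List.replicate 240 " ") 5 1 rfl hc5]
  have h2 := pv_writeSeq_eq ff
      (["4"] ++ (cc.map (fun c => c.toString) ++ List.replicate (5 - cc.length) " "))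
      (List.replicate 240 " ") 8 6 (by simp; omega) hf8
  simp only [List.append_assoc] at h2
  rw [h2]
  have e2 : List.replicate 240 " " = " " :: (List.replicate 237 " " ++ [" ", " "]) := by
    rw [show (240 : Nat) = 1 + (237 + 2) from rfl, List.replicate_add, List.replicate_add]
    rfl
  rw [e2]
  simp only [List.cons_append, List.nil_append]
  have h3 := pv_set_at_len
      (["4"] ++ (cc.map (fun c => c.toString) ++ (List.replicate (5 - cc.length) " "
        ++ (ff.map (fun c => c.toString) ++ List.replicate (8 - ff.length) " "))))
      " " (List.replicate 237 " " ++ [" ", " "]) t 14 (by simp; omega)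
  simp only [List.append_assoc, List.cons_append, List.nil_append] at h3
  rw [h3]
  have h4 := pv_set_at_len
      (["4"] ++ (cc.map (fun c => c.toString) ++ (List.replicate (5 - cc.length) " "
        ++ (ff.map (fun c => c.toString) ++ (List.replicate (8 - ff.length) " "
        ++ (t :: List.replicate 237 " "))))))
      " " [" "] "E" 252 (by simp; omega)
  simp only [List.append_assoc, List.cons_append, List.nil_append] at h4
  rw [h4]
  have h5 := pv_set_at_len
      (["4"] ++ (cc.map (fun c => c.toString) ++ (List.replicate (5 - cc.length) " "
        ++ (ff.map (fun c => c.toString) ++ (List.replicate (8 - ff.length) " "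
        ++ (t :: (List.replicate 237 " " ++ ["E"])))))))
      " " [] "N" 253 (by simp; omega)
  simp only [List.append_assoc, List.cons_append, List.nil_append] at h5
  rw [h5]

-- mapping 'pad with spaces past the end of l' over range n yields l followed by spaces
theorem pv_padMap (l : List Char) (n : Nat) (h : l.length ≤ n) :
    (List.range n).map (fun j => if j < l.length then (l.getD j ' ').toString else " ")
      = l.map (fun c => c.toString) ++ List.replicate (n - l.length) " " := by
  induction l generalizing n with
  | nil => simp
  | cons a tl ih =>
    cases n with
    | zero => simp at h
    | succ m =>
      rw [List.range_succ_eq_map]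
      simp only [List.map_cons, List.map_map]
      have htl : tl.length ≤ m := by simpa using h
      have hfun : ((fun j => if j < (a :: tl).length then ((a :: tl).getD j ' ').toString
              else " ") ∘ Nat.succ)
          = (fun j => if j < tl.length then (tl.getD j ' ').toString else " ") := by
        funext j
        simp [Function.comp]
      rw [hfun, ih m htl]
      simp

-- B reduces to the same canonical form
set_option maxRecDepth 8000 in
theorem pv_B_canon (c f t : String) :
    base_record_py_alt c f t
      = pvCanon ((if c = "" then "" else c).toList.take 5)
                ((if f = "" then "" else f).toList.take 8) t := by
  simp only [base_record_py_alt, pvCanon]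
  set cc := (if c = "" then "" else c).toList.take 5 with hcc
  set ff := (if f = "" then "" else f).toList.take 8 with hff
  have hc5 : cc.length ≤ 5 := by rw [hcc]; exact List.length_take_le 5 _
  have hf8 : ff.length ≤ 8 := by rw [hff]; exact List.length_take_le 8 _
  -- split range 254 into the seven chunks B's cell function distinguishes
  have hsplit : List.range 254
      = [0] ++ (List.range 5).map (1 + ·) ++ (List.range 8).map (6 + ·)
        ++ [14] ++ (List.range 237).map (15 + ·) ++ [252] ++ [253] := by decide
  rw [hsplit]
  simp only [List.map_append, List.map_map, List.map_cons, List.map_nil, Function.comp_def]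
  have hchunk1 : ∀ j, j ∈ List.range 5 →
      pvCell cc ff t (1 + j) = (if j < cc.length then (cc.getD j ' ').toString else " ") := by
    intro j hj
    rw [List.mem_range] at hj
    simp only [pvCell]
    rw [if_neg (by omega)]
    by_cases hlt : j < cc.length
    · rw [if_pos ⟨by omega, by omega, by simpa [Nat.add_comm] using hlt⟩]
      simp [Nat.add_comm, hlt]
    · rw [if_neg (by omega), if_neg (by omega), if_neg (by omega), if_neg (by omega),
          if_neg (by omega)]
      exact (if_neg hlt).symm
  have hchunk2 : ∀ j, j ∈ List.range 8 →
      pvCell cc ff t (6 + j) = (if j < ff.length then (ff.getD j ' ').toString else " ") := by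
    intro j hj
    rw [List.mem_range] at hj
    simp only [pvCell]
    rw [if_neg (by omega), if_neg (by omega)]
    by_cases hlt : j < ff.length
    · rw [if_pos ⟨by omega, by omega, by simpa [Nat.add_comm] using hlt⟩]
      simp [Nat.add_comm, hlt]
    · rw [if_neg (by omega), if_neg (by omega), if_neg (by omega), if_neg (by omega)]
      exact (if_neg hlt).symm
  have hchunk3 : ∀ j, j ∈ List.range 237 → pvCell cc ff t (15 + j) = " " := by
    intro j hj
    rw [List.mem_range] at hj
    simp only [pvCell]
    rw [if_neg (by omega), if_neg (by omega), if_neg (by omega), if_neg (by omega),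
        if_neg (by omega), if_neg (by omega)]
  rw [List.map_congr_left hchunk1, List.map_congr_left hchunk2, List.map_congr_left hchunk3,
      pv_padMap cc 5 hc5, pv_padMap ff 8 hf8]
  simp only [List.map_const']
  have h14 : pvCell cc ff t 14 = t := by
    simp only [pvCell]
    rw [if_neg (by omega), if_neg (by omega), if_neg (by omega), if_pos trivial]
  have h252 : pvCell cc ff t 252 = "E" := by
    simp only [pvCell]
    rw [if_neg (by omega), if_neg (by omega), if_neg (by omega), if_neg (by omega), if_pos trivial]
  have h253 : pvCell cc ff t 253 = "N" := by
    simp only [pvCell]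
    rw [if_neg (by omega), if_neg (by omega), if_neg (by omega), if_neg (by omega),
        if_neg (by omega), if_pos trivial]
  have h0 : pvCell cc ff t 0 = "4" := rfl
  rw [h14, h252, h253, h0]
  simp [List.append_assoc]

-- ===== VERDICT (by name: the statement is the Claim_ definition above) =====
theorem base_record_py_spec : Claim_equal_base_record_py := by
  intro c f t _
  simp only [Spec_base_record_py]
  rw [pv_A_canon, pv_B_canon]
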